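-- pv_equiv track=rewrite | github.com/Gaelic-Algorithmic-Research-Group/Gaelic-Text-Normaliser | utils/utils.py | bigrams_to_string
-- ===== SOURCE A (Python) =====
-- def bigrams_to_string(bigrams):
--     line = []
--
--     for i in bigrams:
--         line.append(i[0])
--         line.append(i[1])
--         break
--
--     for i in bigrams[1:]:
--         line.append(i[1])
--
--     return ' '.join(line)
-- ===== SOURCE B (Python) =====
-- def bigrams_to_string(bigrams):
--     if not bigrams:
--         return ''
--     # build the suffix back-to-front: prepend ' ' + second word while walking the list in reverse
--     out = ''
--     for b in reversed(bigrams):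
--         out = ' ' + b[1] + out
--     return bigrams[0][0] + out
-- ===== Notes on version B (the rewrite author's own statement) =====
-- stated objective: alternative
-- what changed: Replaces A's forward list-building (break-loop plus [1:] slice) and ' '.join with a reverse traversal that builds the result string back-to-front by direct concatenation, prepending ' '+second-word for each bigram onto the accumulator, then prefixing the first bigram's first word; no intermediate list and no join.
import Mathlib
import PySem

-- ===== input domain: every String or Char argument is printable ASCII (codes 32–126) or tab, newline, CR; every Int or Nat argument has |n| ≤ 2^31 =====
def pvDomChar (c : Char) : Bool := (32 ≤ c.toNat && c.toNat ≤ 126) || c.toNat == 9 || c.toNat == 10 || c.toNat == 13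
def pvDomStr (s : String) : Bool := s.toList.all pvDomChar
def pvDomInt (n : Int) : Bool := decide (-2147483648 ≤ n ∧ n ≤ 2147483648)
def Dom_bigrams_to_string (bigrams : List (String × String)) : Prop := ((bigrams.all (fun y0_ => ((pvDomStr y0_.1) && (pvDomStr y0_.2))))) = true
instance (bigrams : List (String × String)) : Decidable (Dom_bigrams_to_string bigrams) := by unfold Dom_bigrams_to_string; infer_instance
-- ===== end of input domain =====

-- B replaces A's list-building (break-loop plus [1:] slice) and ' '.join with a reverse traversal building the result back-to-front by direct string concatenation (objective: alternative).


-- ===== PORT A =====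
-- A: appends the first pair's two words (loop with break), then the second word of each of bigrams[1:]; joins with ' '.
def bigrams_to_string (bigrams : List (String × String)) : String :=
  let line : List String := []
  -- 'for i in bigrams: line.append(i[0]); line.append(i[1]); break' — body runs at most once
  let line := match bigrams with
    | [] => line
    | i :: _ => (line ++ [i.1]) ++ [i.2]
  -- 'for i in bigrams[1:]: line.append(i[1])'
  let line := (PySem.List.slice bigrams (some 1) none).foldl (fun acc i => acc ++ [i.2]) line
  PySem.Str.join " " line

-- ===== PORT B =====
-- B: reverse traversal building the suffix back-to-front by direct string concatenation.
def bigrams_to_string_alt (bigrams : List (String × String)) : String :=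
  match bigrams with
  | [] => ""
  | b0 :: _ =>
    -- 'for b in reversed(bigrams): out = ' ' + b[1] + out'
    let out := bigrams.reverse.foldl (fun out b => " " ++ b.2 ++ out) ""
    b0.1 ++ out

-- ===== PRECONDITION & SPEC =====
def Spec_bigrams_to_string (bigrams : List (String × String)) (out : String) : Prop := out = bigrams_to_string_alt bigrams
instance (bigrams : List (String × String)) (out : String) : Decidable (Spec_bigrams_to_string bigrams out) := by unfold Spec_bigrams_to_string; infer_instance

-- ===== CLAIM (what is proved, stated in full; the proofs are below) =====
def Claim_equal_bigrams_to_string : Prop := ∀ (bigrams : List (String × String)), Dom_bigrams_to_string bigrams → Spec_bigrams_to_string bigrams (bigrams_to_string bigrams)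

-- ===== LEMMAS AND PROOFS =====
-- proof-only helper: the suffix ' w1 w2 …' of second words
def pvTail : List (String × String) → String
  | [] => ""
  | b :: t => " " ++ b.2 ++ pvTail t

theorem pv_revfoldl_eq_tail (l : List (String × String)) (acc : String) :
    l.reverse.foldl (fun out b => " " ++ b.2 ++ out) acc = pvTail l ++ acc := by
  induction l generalizing acc with
  | nil => simp [pvTail]
  | cons x t ih =>
    simp only [List.reverse_cons, List.foldl_append, List.foldl_cons, List.foldl_nil]
    rw [ih]
    simp [pvTail, String.append_assoc]

-- join with ' ' of s followed by the second components equals s followed by pvTail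
theorem pv_join_eq_pvTail (s : String) (l : List (String × String)) :
    PySem.Str.join " " (s :: l.map (fun b => b.2)) = s ++ pvTail l := by
  induction l generalizing s with
  | nil =>
    apply String.toList_inj.mp
    simp [PySem.Str.toList_join, PySem.Chars.join_singleton, pvTail]
  | cons b t ih =>
    apply String.toList_inj.mp
    have h := congrArg String.toList (ih b.2)
    simp only [PySem.Str.toList_join, String.toList_append, List.map_cons] at h ⊢
    rw [PySem.Chars.join_cons_cons, h]
    simp [pvTail]

-- ===== VERDICT (by name: the statement is the Claim_ definition above) =====
theorem bigrams_to_string_spec : Claim_equal_bigrams_to_string := by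
  intro bigrams _
  unfold Spec_bigrams_to_string bigrams_to_string bigrams_to_string_alt
  cases bigrams with
  | nil =>
    apply String.toList_inj.mp
    simp [PySem.List.slice, PySem.Str.toList_join, PySem.Chars.join, List.intercalate]
  | cons b0 rest =>
    simp only [PySem.List.slice_from_one, PySem.List.foldl_append_singleton_eq_map,
      List.tail_cons, List.nil_append, pv_revfoldl_eq_tail]
    have h := pv_join_eq_pvTail b0.1 (b0 :: rest)
    simp only [List.map_cons] at h
    simpa using h
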